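-- pv_equiv track=rewrite | github.com/ravish-oo/opoch-toe-arcagi | src/arcbit/emitters/lfp.py | _reorder_emitters
-- ===== SOURCE A (Python) =====
-- from typing import Dict, List, Tuple, Optional, TypedDict, Set
--
-- FROZEN_FAMILY_ORDER = [
--     "T1_witness",
--     "T2_unity",
--     "T3_lattice",
--     "T4_kron",
--     "T5_conv",
--     "T6_morph",
--     "T7_logic",
--     "T8_param",
--     # T9 is size; no admits
--     "T10_forbids",  # placeholder; AC-3 consumes forbids separately
--     "T11_csp",
--     "T12_strata",
-- ]
--
-- def _reorder_emitters(
--     emitters_list: List[Tuple[str, Optional[Dict[int, List[int]]], Optional[List[int]]]]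
-- ) -> List[Tuple[str, Optional[Dict[int, List[int]]], Optional[List[int]]]]:
--     """
--     Reorder emitters to frozen family order T1...T12.
--
--     Each family may appear at most once. Raises ValueError if duplicates detected.
--
--     Args:
--         emitters_list: List of (family_name, A, S) in any order
--
--     Returns:
--         Reordered list following FROZEN_FAMILY_ORDER
--
--     Raises:
--         ValueError: If duplicate family names are detected
--
--     Spec: WO-11 v1.6 frozen family order
--     """
--     # Validate: no duplicate family names
--     family_names = [family for family, _, _ in emitters_list]
--     duplicates = {name for name in family_names if family_names.count(name) > 1}
--
--     if duplicates:
--         raise ValueError(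
--             f"Duplicate emitter families detected: {sorted(duplicates)}. "
--             f"Each Tx family must be unique by design; merge duplicates inside "
--             f"the emitter before M4."
--         )
--
--     # Build dict for fast lookup (safe now; no duplicates)
--     emitters_dict = {family: (A, S) for family, A, S in emitters_list}
--
--     # Reorder according to frozen order
--     result = []
--     for family in FROZEN_FAMILY_ORDER:
--         if family in emitters_dict:
--             A, S = emitters_dict[family]
--             result.append((family, A, S))
--
--     return result
-- ===== SOURCE B (Python) =====
-- FROZEN_FAMILY_ORDER = [
--     "T1_witness",
--     "T2_unity",
--     "T3_lattice",
--     "T4_kron",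
--     "T5_conv",
--     "T6_morph",
--     "T7_logic",
--     "T8_param",
--     "T10_forbids",
--     "T11_csp",
--     "T12_strata",
-- ]
--
--
-- def _reorder_emitters(emitters_list):
--     """Count families in one pass to find duplicates, then sort the known
--     families by a frozen-index key (instead of A's quadratic .count() filter
--     and template-driven dict probing)."""
--     counts = {}
--     for family, _, _ in emitters_list:
--         counts[family] = counts.get(family, 0) + 1
--     dups = sorted(name for name, c in counts.items() if c > 1)
--     if dups:
--         raise ValueError(
--             f"Duplicate emitter families detected: {dups}. "
--             f"Each Tx family must be unique by design; merge duplicates inside "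
--             f"the emitter before M4."
--         )
--     order = {name: i for i, name in enumerate(FROZEN_FAMILY_ORDER)}
--     return sorted((e for e in emitters_list if e[0] in order),
--                   key=lambda e: order[e[0]])
-- ===== Notes on version B (the rewrite author's own statement) =====
-- stated objective: idiomatic
-- what changed: B finds duplicates with a single-pass count dict instead of A's quadratic list.count filter, and reorders by filtering the input to known families and sorting on a frozen-index key instead of iterating the frozen template and probing a dict built from the input.
import Mathlib
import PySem

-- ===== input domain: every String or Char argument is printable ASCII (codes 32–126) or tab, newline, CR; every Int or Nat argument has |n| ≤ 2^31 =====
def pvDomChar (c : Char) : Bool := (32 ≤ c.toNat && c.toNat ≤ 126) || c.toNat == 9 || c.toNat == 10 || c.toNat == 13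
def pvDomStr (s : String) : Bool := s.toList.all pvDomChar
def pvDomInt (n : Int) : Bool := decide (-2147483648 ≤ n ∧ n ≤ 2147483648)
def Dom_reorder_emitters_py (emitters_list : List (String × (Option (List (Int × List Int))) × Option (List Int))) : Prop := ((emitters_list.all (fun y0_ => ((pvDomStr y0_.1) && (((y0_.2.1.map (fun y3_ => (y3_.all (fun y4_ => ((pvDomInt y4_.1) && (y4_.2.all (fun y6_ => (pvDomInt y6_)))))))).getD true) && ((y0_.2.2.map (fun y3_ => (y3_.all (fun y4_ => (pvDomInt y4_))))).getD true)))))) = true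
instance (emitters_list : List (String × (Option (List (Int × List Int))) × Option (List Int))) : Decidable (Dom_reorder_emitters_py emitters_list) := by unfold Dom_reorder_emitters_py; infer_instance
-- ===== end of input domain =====

-- B finds duplicates with a single-pass count dict instead of A's quadratic list.count filter,
-- and reorders by filtering to known families and sorting on a frozen-index key instead of
-- A's template-driven iteration over a dict built from the input (objective: idiomatic).

def pvFrozenFamilyOrder : List String :=
  ["T1_witness", "T2_unity", "T3_lattice", "T4_kron", "T5_conv", "T6_morph",
   "T7_logic", "T8_param", "T10_forbids", "T11_csp", "T12_strata"]

-- ===== PORT A =====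
def reorder_emitters_py (emitters_list : List (String × (Option (List (Int × List Int))) × Option (List Int))) : List (String × (Option (List (Int × List Int))) × Option (List Int)) :=
  let family_names := emitters_list.map (fun e => e.1)
  let duplicates : PySem.Set String :=
    PySem.Set.ofList (family_names.filter (fun name => family_names.count name > 1))
  if duplicates ≠ [] then []  -- 'raise ValueError(...)': excluded by Pre_
  else
    let emitters_dict : PySem.Dict String ((Option (List (Int × List Int))) × Option (List Int)) :=
      emitters_list.foldl (fun d e => d.insert e.1 e.2) PySem.Dict.empty
    pvFrozenFamilyOrder.foldl
      (fun result family =>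
        if emitters_dict.contains family then
          -- A, S = emitters_dict[family]: under the contains guard get? is some, so getD is exact
          result ++ [(family, (emitters_dict.get? family).getD (none, none))]
        else result) []

-- ===== PORT B =====
def reorder_emitters_py_alt (emitters_list : List (String × (Option (List (Int × List Int))) × Option (List Int))) : List (String × (Option (List (Int × List Int))) × Option (List Int)) :=
  let counts : PySem.Dict String Int :=
    emitters_list.foldl (fun d e => d.modify e.1 0 (· + 1)) PySem.Dict.empty
  let dups : List String :=
    PySem.List.sorted ((counts.items.filter (fun p => p.2 > 1)).map (fun p => p.1)) (fun x => x)
  if dups ≠ [] then []  -- 'raise ValueError(...)': excluded by Pre_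
  else
    let order : PySem.Dict String Int :=
      PySem.Dict.ofList ((PySem.List.enumerate pvFrozenFamilyOrder).map (fun p => (p.2, p.1)))
    let kept := emitters_list.filter (fun e => order.contains e.1)
    -- order[e[0]]: KeyError unreachable on kept (filtered to keys of order), so getD is exact
    PySem.List.sorted kept (fun e => order.getD e.1 0)

-- ===== PRECONDITION & SPEC =====
-- Pre_ excludes exactly the inputs with a duplicate family name, on which Python A raises ValueError.
def Pre_reorder_emitters_py (emitters_list : List (String × (Option (List (Int × List Int))) × Option (List Int))) : Prop :=
  (emitters_list.map (fun e => e.1)).Nodup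
instance (emitters_list : List (String × (Option (List (Int × List Int))) × Option (List Int))) : Decidable (Pre_reorder_emitters_py emitters_list) := by unfold Pre_reorder_emitters_py; infer_instance

def pvWitness_reorder_emitters_py : (List (String × (Option (List (Int × List Int))) × Option (List Int))) :=
  [("T2_unity", none, some [1, 2]), ("T1_witness", some [(0, [3])], none), ("T9_size", none, none)]

def Spec_reorder_emitters_py (emitters_list : List (String × (Option (List (Int × List Int))) × Option (List Int))) (out : List (String × (Option (List (Int × List Int))) × Option (List Int))) : Prop := out = reorder_emitters_py_alt emitters_list
instance (emitters_list : List (String × (Option (List (Int × List Int))) × Option (List Int))) (out : List (String × (Option (List (Int × List Int))) × Option (List Int))) : Decidable (Spec_reorder_emitters_py emitters_list out) := by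
  unfold Spec_reorder_emitters_py
  letI i1 : DecidableEq ((Option (List (Int × List Int))) × Option (List Int)) := by infer_instance
  letI i2 : DecidableEq (String × (Option (List (Int × List Int))) × Option (List Int)) := by infer_instance
  infer_instance

-- ===== CLAIM (what is proved, stated in full; the proofs are below) =====
def Claim_equal_reorder_emitters_py : Prop := ∀ (emitters_list : List (String × (Option (List (Int × List Int))) × Option (List Int))), Dom_reorder_emitters_py emitters_list → Pre_reorder_emitters_py emitters_list → Spec_reorder_emitters_py emitters_list (reorder_emitters_py emitters_list)

-- ===== LEMMAS AND PROOFS =====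

-- B's count loop, keyed by e.1, is the counter of the family names
theorem pv_count_loop_eq_counter {α : Type} (l : List (String × α)) (d : PySem.Dict String Int) :
    l.foldl (fun d e => d.modify e.1 0 (· + 1)) d
      = (l.map (fun e => e.1)).foldl (fun d x => d.modify x 0 (· + 1)) d := by
  induction l generalizing d with
  | nil => rfl
  | cons a t ih => simp [List.foldl_cons, ih]

-- the dict built by A, in any intermediate state
theorem pv_get?_foldl_insert {ν : Type} (l : List (String × ν)) (d : PySem.Dict String ν) (k : String) :
    (l.foldl (fun d e => d.insert e.1 e.2) d).get? k =
      match l.reverse.find? (fun e => e.1 == k) with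
      | some e => some e.2
      | none => d.get? k := by
  induction l generalizing d with
  | nil => simp
  | cons a t ih =>
    rw [List.foldl_cons, ih, List.reverse_cons, List.find?_append]
    cases h : t.reverse.find? (fun e => e.1 == k) with
    | some e => simp [Option.or]
    | none =>
      simp only [Option.none_or, List.find?, PySem.Dict.get?_insert]
      by_cases hk : a.1 = k
      · have hb : (a.1 == k) = true := by simp [hk]
        simp [hk]
      · have hb : (a.1 == k) = false := by simp [hk]
        have hk' : ¬ k = a.1 := fun h2 => hk h2.symm
        simp [hb, hk']

theorem pv_find?_reverse_of_nodup {ν : Type} (l : List (String × ν)) (k : String)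
    (h : (l.map (fun e => e.1)).Nodup) :
    l.reverse.find? (fun e => e.1 == k) = l.find? (fun e => e.1 == k) := by
  induction l with
  | nil => rfl
  | cons a t ih =>
    simp only [List.map_cons, List.nodup_cons, List.mem_map] at h
    obtain ⟨hna, hnt⟩ := h
    rw [List.reverse_cons, List.find?_append, ih hnt]
    by_cases hk : a.1 = k
    · have hnone : t.find? (fun e => e.1 == k) = none := by
        rw [List.find?_eq_none]
        intro x hx hbeq
        exact hna ⟨x, hx, by rw [eq_of_beq hbeq, hk]⟩
      have hb : (a.1 == k) = true := by simp [hk]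
      simp [hnone, List.find?, hb]
    · have hb : (a.1 == k) = false := by simp [hk]
      simp [List.find?, hb]

-- the group of entries of l with family k, seen through the dict
theorem pv_group_eq {ν : Type} (l : List (String × ν)) (k : String)
    (h : (l.map (fun e => e.1)).Nodup) :
    (((l.foldl (fun d e => d.insert e.1 e.2) PySem.Dict.empty).get? k).map
        (fun v => (k, v))).toList
      = l.filter (fun e => e.1 == k) := by
  rw [pv_get?_foldl_insert, pv_find?_reverse_of_nodup l k h]
  induction l with
  | nil => simp [PySem.Dict.get?_empty]
  | cons a t ih =>
    simp only [List.map_cons, List.nodup_cons, List.mem_map] at h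
    obtain ⟨hna, hnt⟩ := h
    by_cases hk : a.1 = k
    · have hfil : t.filter (fun e => e.1 == k) = [] := by
        rw [List.filter_eq_nil_iff]
        intro x hx hbeq
        exact hna ⟨x, hx, by rw [eq_of_beq hbeq, hk]⟩
      have hb : (a.1 == k) = true := by simp [hk]
      subst hk
      simp [List.find?, List.filter_cons, hfil]
    · have hb : (a.1 == k) = false := by simp [hk]
      simp only [List.find?, hb, List.filter_cons]
      simpa [hb] using ih hnt

-- A's reorder loop as a flatMap over the frozen order
theorem pv_foldA {ν : Type} (d : PySem.Dict String ν) (dflt : ν) (F : List String)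
    (acc : List (String × ν)) :
    F.foldl
      (fun result family =>
        if d.contains family then
          result ++ [(family, (d.get? family).getD dflt)]
        else result) acc
      = acc ++ F.flatMap (fun family => ((d.get? family).map (fun v => (family, v))).toList) := by
  induction F generalizing acc with
  | nil => simp
  | cons f F ih =>
    rw [List.foldl_cons, ih, List.flatMap_cons, PySem.Dict.contains_eq_isSome_get?]
    cases h : d.get? f with
    | some v => simp [h]
    | none => simp [h]

theorem pv_flatMap_congr {α β : Type} (F : List α) (g g' : α → List β)
    (h : ∀ f ∈ F, g f = g' f) : F.flatMap g = F.flatMap g' := by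
  induction F with
  | nil => rfl
  | cons a t ih =>
    simp only [List.flatMap_cons, h a (List.mem_cons_self ..),
      ih (fun f hf => h f (List.mem_cons_of_mem a hf))]

-- grouping the kept entries of l by family in frozen order is a permutation of the kept entries
theorem pv_perm_flatMap_filter {ν : Type} (F : List String) (hF : F.Nodup)
    (l : List (String × ν)) :
    (F.flatMap (fun f => l.filter (fun e => e.1 == f))).Perm
      (l.filter (fun e => decide (e.1 ∈ F))) := by
  induction l with
  | nil => simp
  | cons a t ih =>
    by_cases hm : a.1 ∈ F
    · obtain ⟨F1, F2, rfl⟩ := List.append_of_mem hm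
      have hnd := hF
      simp only [List.nodup_append, List.nodup_cons] at hnd
      have hna1 : a.1 ∉ F1 := fun hx => hnd.2.2 a.1 hx a.1 (List.mem_cons_self ..) rfl
      have hna2 : a.1 ∉ F2 := hnd.2.1.1
      have hstep : ∀ (G : List String), a.1 ∉ G →
          G.flatMap (fun f => (a :: t).filter (fun e => e.1 == f))
            = G.flatMap (fun f => t.filter (fun e => e.1 == f)) := by
        intro G hG
        apply pv_flatMap_congr
        intro f hf
        have : (a.1 == f) = false := by
          simp only [beq_eq_false_iff_ne, ne_eq]
          exact fun he => hG (he ▸ hf)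
        simp [List.filter_cons, this]
      have hmid : (a :: t).filter (fun e => e.1 == a.1)
          = a :: t.filter (fun e => e.1 == a.1) := by
        simp [List.filter_cons]
      have hgoal : ((F1 ++ a.1 :: F2).flatMap fun f => (a :: t).filter (fun e => e.1 == f))
          = F1.flatMap (fun f => t.filter (fun e => e.1 == f))
            ++ (a :: (t.filter (fun e => e.1 == a.1)
            ++ F2.flatMap (fun f => t.filter (fun e => e.1 == f)))) := by
        rw [List.flatMap_append, List.flatMap_cons, hstep F1 hna1, hstep F2 hna2, hmid]
        simp [List.cons_append]
      rw [hgoal]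
      have hperm : (F1.flatMap (fun f => t.filter (fun e => e.1 == f))
            ++ (a :: (t.filter (fun e => e.1 == a.1)
            ++ F2.flatMap (fun f => t.filter (fun e => e.1 == f))))).Perm
          (a :: ((F1 ++ a.1 :: F2).flatMap fun f => t.filter (fun e => e.1 == f))) := by
        have hpm := List.perm_middle (a := a)
          (l₁ := F1.flatMap (fun f => t.filter (fun e => e.1 == f)))
          (l₂ := t.filter (fun e => e.1 == a.1)
            ++ F2.flatMap (fun f => t.filter (fun e => e.1 == f)))
        simpa [List.flatMap_append, List.flatMap_cons, List.append_assoc] using hpm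
      refine hperm.trans ?_
      have hdm : decide (a.1 ∈ F1 ++ a.1 :: F2) = true := by simp
      simp only [List.filter_cons, hdm, if_pos]
      exact ih.cons a
    · have heq : (F.flatMap fun f => (a :: t).filter (fun e => e.1 == f))
          = F.flatMap (fun f => t.filter (fun e => e.1 == f)) := by
        apply pv_flatMap_congr
        intro f hf
        have : (a.1 == f) = false := by
          simp only [beq_eq_false_iff_ne, ne_eq]
          exact fun he => hm (he ▸ hf)
        simp [List.filter_cons, this]
      rw [heq]
      have hd : decide (a.1 ∈ F) = false := by simpa using hm
      simpa [List.filter_cons, hd] using ih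

-- a flatMap of ≤1-element groups whose keys strictly increase along F is strictly key-sorted
theorem pv_pairwise_flatMap {α : Type} (key : α → Int) (idx : String → Int)
    (F : List String) (g : String → List α)
    (hidx : F.Pairwise (fun a b => idx a < idx b))
    (hkey : ∀ f ∈ F, ∀ x ∈ g f, key x = idx f)
    (hone : ∀ f ∈ F, (g f).length ≤ 1) :
    (F.flatMap g).Pairwise (fun a b => key a < key b) := by
  induction F with
  | nil => simp
  | cons f F ih =>
    simp only [List.flatMap_cons]
    rw [List.pairwise_append]
    refine ⟨?_, ?_, ?_⟩
    · have h1 := hone f (List.mem_cons_self ..)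
      match hg : g f with
      | [] => simp
      | [x] => simp
      | x :: y :: r => rw [hg] at h1; simp at h1
    · exact ih (List.Pairwise.sublist (List.sublist_cons_self ..) hidx)
        (fun f' hf' => hkey f' (List.mem_cons_of_mem _ hf'))
        (fun f' hf' => hone f' (List.mem_cons_of_mem _ hf'))
    · intro x hx y hy
      obtain ⟨f', hf', hyf'⟩ := List.mem_flatMap.mp hy
      rw [hkey f (List.mem_cons_self ..) x hx, hkey f' (List.mem_cons_of_mem _ hf') y hyf']
      exact (List.pairwise_cons.mp hidx).1 f' hf'

-- ===== VERDICT (by name: the statement is the Claim_ definition above) =====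
theorem reorder_emitters_py_spec : Claim_equal_reorder_emitters_py := by
  intro l _ hpre
  unfold Pre_reorder_emitters_py at hpre
  unfold Spec_reorder_emitters_py reorder_emitters_py reorder_emitters_py_alt
  -- A's duplicate filter is empty under Nodup
  have hdup : ((l.map (fun e => e.1)).filter
      (fun name => (l.map (fun e => e.1)).count name > 1)) = [] := by
    rw [List.filter_eq_nil_iff]
    intro x hx
    have := List.nodup_iff_count_le_one.mp hpre x
    simp only [gt_iff_lt, decide_eq_true_eq]
    omega
  simp only [hdup]
  -- B's duplicate list is empty under Nodup
  have hcnt : l.foldl (fun d e => d.modify e.1 0 (· + 1))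
      (PySem.Dict.empty : PySem.Dict String Int)
      = PySem.Dict.counter (l.map (fun e => e.1)) := by
    rw [pv_count_loop_eq_counter, PySem.Dict.counter_eq_foldl]
  have hdupB : (((l.foldl (fun d e => d.modify e.1 0 (· + 1))
      (PySem.Dict.empty : PySem.Dict String Int)).items.filter
        (fun p => p.2 > 1)).map (fun p => p.1)) = [] := by
    rw [hcnt, PySem.Dict.items_counter]
    rw [List.filter_map, List.map_eq_nil_iff, List.map_eq_nil_iff, List.filter_eq_nil_iff]
    intro k _
    have := List.nodup_iff_count_le_one.mp hpre k
    simp only [Function.comp, gt_iff_lt, decide_eq_true_eq]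
    omega
  simp only [hdupB]
  have hempty : (PySem.Set.ofList ([] : List String)) = ([] : List String) := rfl
  simp only [hempty, ne_eq, not_true_eq_false, if_false, reduceIte,
    PySem.List.sorted]
  -- both take the else branch
  set d := l.foldl (fun d e => d.insert e.1 e.2)
      (PySem.Dict.empty : PySem.Dict String ((Option (List (Int × List Int))) × Option (List Int))) with hd
  set order := PySem.Dict.ofList
      ((PySem.List.enumerate pvFrozenFamilyOrder).map (fun p => (p.2, p.1))) with horder
  have hcont : ∀ s : String, order.contains s = decide (s ∈ pvFrozenFamilyOrder) := by
    intro s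
    rw [PySem.Dict.contains_eq_decide_mem_keys]
    have : order.keys = pvFrozenFamilyOrder := by rw [horder]; decide
    rw [this]
  have hgroups : pvFrozenFamilyOrder.flatMap
      (fun family => ((d.get? family).map (fun v => (family, v))).toList)
      = pvFrozenFamilyOrder.flatMap (fun f => l.filter (fun e => e.1 == f)) :=
    pv_flatMap_congr _ _ _ (fun f _ => pv_group_eq l f hpre)
  have hkept : l.filter (fun e => order.contains e.1)
      = l.filter (fun e => decide (e.1 ∈ pvFrozenFamilyOrder)) := by
    apply List.filter_congr
    intro e _
    rw [hcont]
  have hperm : (pvFrozenFamilyOrder.flatMap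
      (fun family => ((d.get? family).map (fun v => (family, v))).toList)).Perm
      (l.filter (fun e => order.contains e.1)) := by
    rw [hgroups, hkept]
    exact pv_perm_flatMap_filter pvFrozenFamilyOrder (by decide) l
  have hpw : (pvFrozenFamilyOrder.flatMap
      (fun family => ((d.get? family).map (fun v => (family, v))).toList)).Pairwise
      (fun a b => order.getD a.1 0 < order.getD b.1 0) := by
    apply pv_pairwise_flatMap
      (α := String × (Option (List (Int × List Int))) × Option (List Int))
      (fun e => order.getD e.1 0) (fun f => order.getD f 0)
    · rw [horder]; decide
    · intro f _ x hx
      cases hg : d.get? f with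
      | none => simp [hg] at hx
      | some v =>
        simp only [hg, Option.map_some, Option.toList_some, List.mem_singleton] at hx
        subst hx; rfl
    · intro f _
      cases hg : d.get? f <;> simp [hg]
  apply Eq.trans (pv_foldA d (none, none) pvFrozenFamilyOrder [])
  rw [List.nil_append]
  exact (PySem.List.sorted_eq_of_perm_of_pairwise_lt _ _ _ hperm hpw).symm
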